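-- pv_equiv track=rewrite | github.com/LINSUISHENG034/WorkDataHub | src/work_data_hub/io/loader/warehouse_loader.py | _prepare_unique_pk_tuples
-- ===== SOURCE A (Python) =====
-- from typing import Any, Dict, Iterable, List, Optional, Tuple
--
-- def _ensure_list_of_dicts(rows: List[Dict[str, Any]]) -> List[Dict[str, Any]]:
--     """Validate and normalize row data."""
--     if not isinstance(rows, list):
--         raise ValueError("Rows must be a list")
--
--     for i, row in enumerate(rows):
--         if not isinstance(row, dict):
--             raise ValueError(f"Row {i} must be a dictionary")
--
--     return rows
--
-- def _prepare_unique_pk_tuples(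
--     pk_cols: List[str], rows: List[Dict[str, Any]]
-- ) -> List[Tuple[Any, ...]]:
--     """
--     Extract, validate and deduplicate PK tuples from rows.
--
--     Raises ValueError if any required PK is missing.
--     Returns a sorted list of unique PK tuples for deterministic behavior.
--     """
--     rows = _ensure_list_of_dicts(rows)
--     if not rows:
--         return []
--
--     missing_keys = []
--     pk_tuples: List[Tuple[Any, ...]] = []
--
--     for i, row in enumerate(rows):
--         pk_values = []
--         for col in pk_cols:
--             if col not in row or row[col] is None:
--                 missing_keys.append(f"Row {i} missing key {col}")
--             else:
--                 pk_values.append(row[col])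
--         if len(pk_values) == len(pk_cols):
--             pk_tuples.append(tuple(pk_values))
--
--     if missing_keys:
--         raise ValueError("Missing primary key values: " + "; ".join(missing_keys))
--
--     unique_tuples = sorted(list(set(pk_tuples)))
--     return unique_tuples
-- ===== SOURCE B (Python) =====
-- from typing import Any, Dict, List, Tuple
--
-- def _ensure_list_of_dicts(rows: List[Dict[str, Any]]) -> List[Dict[str, Any]]:
--     """Validate and normalize row data."""
--     if not isinstance(rows, list):
--         raise ValueError("Rows must be a list")
--     for i, row in enumerate(rows):
--         if not isinstance(row, dict):
--             raise ValueError(f"Row {i} must be a dictionary")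
--     return rows
--
-- def _prepare_unique_pk_tuples(
--     pk_cols: List[str], rows: List[Dict[str, Any]]
-- ) -> List[Tuple[Any, ...]]:
--     """Validate first; then dedupe by sorting and dropping adjacent duplicates (no hash set)."""
--     rows = _ensure_list_of_dicts(rows)
--     if not rows:
--         return []
--
--     missing = [
--         f"Row {i} missing key {col}"
--         for i, row in enumerate(rows)
--         for col in pk_cols
--         if col not in row or row[col] is None
--     ]
--     if missing:
--         raise ValueError("Missing primary key values: " + "; ".join(missing))
--
--     ordered = sorted(tuple(row[col] for col in pk_cols) for row in rows)
--     unique: List[Tuple[Any, ...]] = []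
--     for t in ordered:
--         if not unique or unique[-1] != t:
--             unique.append(t)
--     return unique
-- ===== Notes on version B (the rewrite author's own statement) =====
-- stated objective: alternative
-- what changed: A interleaves validation with tuple collection in one loop and deduplicates via a hash set before sorting; B validates in a separate first pass, then sorts the raw (duplicate-containing) tuple list and removes duplicates in a single scan over adjacent elements, using no set at all.
import Mathlib
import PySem

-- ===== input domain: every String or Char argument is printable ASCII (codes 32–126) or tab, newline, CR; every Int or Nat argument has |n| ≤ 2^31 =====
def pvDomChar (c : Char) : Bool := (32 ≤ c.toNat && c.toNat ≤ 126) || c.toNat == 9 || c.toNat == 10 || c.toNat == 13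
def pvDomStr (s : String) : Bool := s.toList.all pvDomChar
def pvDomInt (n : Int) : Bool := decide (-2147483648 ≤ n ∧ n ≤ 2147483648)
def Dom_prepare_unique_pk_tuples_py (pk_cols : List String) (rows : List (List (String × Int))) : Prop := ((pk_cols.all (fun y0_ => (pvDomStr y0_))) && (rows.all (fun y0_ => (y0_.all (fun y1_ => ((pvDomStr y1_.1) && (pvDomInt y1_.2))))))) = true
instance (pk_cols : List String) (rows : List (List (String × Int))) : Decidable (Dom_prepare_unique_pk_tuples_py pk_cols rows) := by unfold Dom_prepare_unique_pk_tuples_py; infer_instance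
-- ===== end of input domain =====

-- B validates first, then deduplicates by sorting the raw tuple list and dropping adjacent
-- duplicates in one scan (no hash set), instead of A's combined loop + set + sort; objective: alternative.

-- ===== PORT A =====
-- single loop: per row, one inner loop accumulating (missing messages, pk values)
def prepare_unique_pk_tuples_py (pk_cols : List String) (rows : List (List (String × Int))) : List (List Int) :=
  if rows = [] then []
  else
    let st := (PySem.List.enumerate rows 0).foldl
      (fun (acc : List String × List (List Int)) p =>
        let inner := pk_cols.foldl
          (fun (s : List String × List Int) col =>
            match (PySem.Dict.mk p.2).get? col with
            | none => (s.1 ++ ["Row " ++ PySem.Int.toStr p.1 ++ " missing key " ++ col], s.2)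
            | some v => (s.1, s.2 ++ [v]))
          ([], [])
        (acc.1 ++ inner.1,
         if inner.2.length = pk_cols.length then acc.2 ++ [inner.2] else acc.2))
      ([], [])
    if st.1 ≠ [] then []  -- Python raises ValueError here; excluded by Pre_
    else PySem.List.sorted (PySem.Set.ofList st.2) (fun x => x) false

-- ===== PORT B =====
-- pass 1: validation comprehension; pass 2: sort the raw tuples, then one scan dropping adjacent duplicates
def prepare_unique_pk_tuples_py_alt (pk_cols : List String) (rows : List (List (String × Int))) : List (List Int) :=
  if rows = [] then []
  else
    let missing := (PySem.List.enumerate rows 0).flatMap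
      (fun p => (pk_cols.filter (fun col => ((PySem.Dict.mk p.2).get? col).isNone)).map
        (fun col => "Row " ++ PySem.Int.toStr p.1 ++ " missing key " ++ col))
    if missing ≠ [] then []  -- Python raises ValueError here; excluded by Pre_
    else
      -- row[col] cannot fail after validation; getD 0 is never the default on Pre_ inputs
      let ordered := PySem.List.sorted
        (rows.map (fun row => pk_cols.map (fun col => ((PySem.Dict.mk row).get? col).getD 0)))
        (fun x => x) false
      ordered.foldl
        (fun (unique : List (List Int)) t =>
          if unique = [] then unique ++ [t]
          else if PySem.List.pyGet? unique (-1) ≠ some t then unique ++ [t]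
          else unique) []

-- ===== PRECONDITION & SPEC =====
-- Pre_ excludes exactly the inputs where the Python raises ValueError: some row missing a pk column.
def Pre_prepare_unique_pk_tuples_py (pk_cols : List String) (rows : List (List (String × Int))) : Prop :=
  ∀ row ∈ rows, ∀ col ∈ pk_cols, col ∈ row.map Prod.fst
instance (pk_cols : List String) (rows : List (List (String × Int))) : Decidable (Pre_prepare_unique_pk_tuples_py pk_cols rows) := by unfold Pre_prepare_unique_pk_tuples_py; infer_instance

def pvWitness_prepare_unique_pk_tuples_py : List String × (List (List (String × Int))) :=
  (["id", "k"], [[("id", 1), ("k", 2)], [("k", 2), ("id", 1)], [("id", 3), ("k", 0)]])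

def Spec_prepare_unique_pk_tuples_py (pk_cols : List String) (rows : List (List (String × Int))) (out : List (List Int)) : Prop := out = prepare_unique_pk_tuples_py_alt pk_cols rows
instance (pk_cols : List String) (rows : List (List (String × Int))) (out : List (List Int)) : Decidable (Spec_prepare_unique_pk_tuples_py pk_cols rows out) := by unfold Spec_prepare_unique_pk_tuples_py; infer_instance

-- ===== CLAIM (what is proved, stated in full; the proofs are below) =====
def Claim_equal_prepare_unique_pk_tuples_py : Prop := ∀ (pk_cols : List String) (rows : List (List (String × Int))), Dom_prepare_unique_pk_tuples_py pk_cols rows → Pre_prepare_unique_pk_tuples_py pk_cols rows → Spec_prepare_unique_pk_tuples_py pk_cols rows (prepare_unique_pk_tuples_py pk_cols rows)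

-- ===== LEMMAS AND PROOFS =====

lemma pv_get?_isSome_of_mem_fst (row : List (String × Int)) (col : String)
    (h : col ∈ row.map Prod.fst) : ((PySem.Dict.mk row).get? col).isSome := by
  induction row with
  | nil => simp at h
  | cons p rest ih =>
    rw [PySem.Dict.get?_mk_cons]
    by_cases hc : p.1 == col
    · simp [hc]
    · simp [hc]
      simp at h
      rcases h with h | h
      · exact absurd (by simp [h]) hc
      · exact ih (by simpa using h)

-- complete row: the inner fold adds no message and appends exactly the looked-up values
lemma pv_rowFold (row : List (String × Int)) (cols : List String) (m : String → String)
    (h : ∀ col ∈ cols, ((PySem.Dict.mk row).get? col).isSome)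
    (acc : List String × List Int) :
    cols.foldl
      (fun (s : List String × List Int) col =>
        match (PySem.Dict.mk row).get? col with
        | none => (s.1 ++ [m col], s.2)
        | some v => (s.1, s.2 ++ [v]))
      acc
    = (acc.1, acc.2 ++ cols.map (fun col => ((PySem.Dict.mk row).get? col).getD 0)) := by
  induction cols generalizing acc with
  | nil => simp
  | cons c cs ih =>
    have hc := h c (by simp)
    obtain ⟨v, hv⟩ := Option.isSome_iff_exists.mp hc
    simp only [List.foldl_cons, hv]
    rw [ih (fun col hcol => h col (by simp [hcol]))]
    simp [hv]

-- complete rows: the combined loop of A collects no message and all extracted tuples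
lemma pv_outerFold (pk_cols : List String) (rows : List (List (String × Int)))
    (h : ∀ row ∈ rows, ∀ col ∈ pk_cols, ((PySem.Dict.mk row).get? col).isSome)
    (n : Int) (acc : List String × List (List Int)) :
    (PySem.List.enumerate rows n).foldl
      (fun (acc : List String × List (List Int)) p =>
        let inner := pk_cols.foldl
          (fun (s : List String × List Int) col =>
            match (PySem.Dict.mk p.2).get? col with
            | none => (s.1 ++ ["Row " ++ PySem.Int.toStr p.1 ++ " missing key " ++ col], s.2)
            | some v => (s.1, s.2 ++ [v]))
          ([], [])
        (acc.1 ++ inner.1,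
         if inner.2.length = pk_cols.length then acc.2 ++ [inner.2] else acc.2))
      acc
    = (acc.1, acc.2 ++ rows.map (fun row => pk_cols.map (fun col => ((PySem.Dict.mk row).get? col).getD 0))) := by
  induction rows generalizing n acc with
  | nil => simp [PySem.List.enumerate]
  | cons r rs ih =>
    rw [PySem.List.enumerate_cons, List.foldl_cons]
    simp only
    rw [pv_rowFold r pk_cols (fun col => "Row " ++ PySem.Int.toStr n ++ " missing key " ++ col)
        (h r (by simp)) ([], [])]
    rw [ih (fun row hr col hc => h row (by simp [hr]) col hc)]
    simp

-- complete rows: B's validation pass produces no message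
lemma pv_flatMapNil (pk_cols : List String) (rows : List (List (String × Int)))
    (h : ∀ row ∈ rows, ∀ col ∈ pk_cols, ((PySem.Dict.mk row).get? col).isSome) (n : Int) :
    (PySem.List.enumerate rows n).flatMap
      (fun p => (pk_cols.filter (fun col => ((PySem.Dict.mk p.2).get? col).isNone)).map
        (fun col => "Row " ++ PySem.Int.toStr p.1 ++ " missing key " ++ col)) = [] := by
  rw [List.flatMap_eq_nil_iff]
  intro p hp
  have hrow : p.2 ∈ rows := by
    rcases (PySem.List.mem_enumerate_iff _ _ _).mp hp with ⟨k, hk, rfl⟩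
    simp
  have : pk_cols.filter (fun col => ((PySem.Dict.mk p.2).get? col).isNone) = [] := by
    rw [List.filter_eq_nil_iff]
    intro col hc
    have := h p.2 hrow col hc
    simp [Option.isNone_iff_eq_none]
    exact Option.isSome_iff_ne_none.mp this
  simp [this]

-- in a strictly increasing list every element is ≤ the last one
lemma pv_le_getLast (l : List (List Int)) (hl : l.Pairwise (· < ·))
    (a : List Int) (ha : a ∈ l) (x : List Int) (hx : l.getLast? = some x) : a ≤ x := by
  obtain ⟨l', rfl⟩ := List.getLast?_eq_some_iff.mp hx
  rw [List.pairwise_append] at hl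
  rcases List.mem_append.mp ha with h | h
  · exact le_of_lt (hl.2.2 a h x (by simp))
  · rw [List.mem_singleton] at h; subst h; exact le_refl _

-- the adjacent-duplicate scan over a ≤-sorted suffix: strictly increasing, same members
lemma pv_foldl_dedup (s : List (List Int)) :
    s.Pairwise (· ≤ ·) → ∀ acc : List (List Int), acc.Pairwise (· < ·) →
    (∀ a ∈ acc, ∀ b ∈ s, a ≤ b) →
    (List.foldl
      (fun (unique : List (List Int)) t =>
        if unique = [] then unique ++ [t]
        else if PySem.List.pyGet? unique (-1) = some t then unique
        else unique ++ [t]) acc s).Pairwise (· < ·)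
    ∧ ∀ y, y ∈ (List.foldl
      (fun (unique : List (List Int)) t =>
        if unique = [] then unique ++ [t]
        else if PySem.List.pyGet? unique (-1) = some t then unique
        else unique ++ [t]) acc s) ↔ y ∈ acc ∨ y ∈ s := by
  induction s with
  | nil => intro _ acc hacc _; exact ⟨hacc, by simp⟩
  | cons t s' ih =>
    intro hs acc hacc hcross
    have hts' : ∀ b ∈ s', t ≤ b := (List.pairwise_cons.mp hs).1
    have hs' : s'.Pairwise (· ≤ ·) := (List.pairwise_cons.mp hs).2
    simp only [List.foldl_cons]
    by_cases hA : acc = []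
    · subst hA
      rw [if_pos rfl, List.nil_append]
      obtain ⟨h1, h2⟩ := ih hs' [t] (List.pairwise_singleton _ _)
        (by intro a ha b hb; rw [List.mem_singleton] at ha; subst ha; exact hts' b hb)
      refine ⟨h1, fun y => ?_⟩
      rw [h2 y]; simp
    · rw [if_neg hA]
      obtain ⟨x, hx⟩ : ∃ x, acc.getLast? = some x := by
        cases hL : acc.getLast? with
        | none => exact absurd (List.getLast?_eq_none_iff.mp hL) hA
        | some x => exact ⟨x, rfl⟩
      have hxm : x ∈ acc := by
        obtain ⟨l', rfl⟩ := List.getLast?_eq_some_iff.mp hx; simp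
      rw [PySem.List.pyGet?_neg_one, hx]
      by_cases ht : x = t
      · subst ht
        rw [if_pos rfl]
        obtain ⟨h1, h2⟩ := ih hs' acc hacc
          (fun a ha b hb => hcross a ha b (List.mem_cons_of_mem _ hb))
        refine ⟨h1, fun y => ?_⟩
        rw [h2 y]
        constructor
        · rintro (h | h)
          · exact Or.inl h
          · exact Or.inr (List.mem_cons_of_mem _ h)
        · rintro (h | h)
          · exact Or.inl h
          · rcases List.mem_cons.mp h with rfl | h
            · exact Or.inl hxm
            · exact Or.inr h
      · have hne : ¬ ((some x : Option (List Int)) = some t) := by simpa using ht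
        rw [if_neg hne]
        have hxt : x < t := lt_of_le_of_ne (hcross x hxm t (by simp)) ht
        have hlt : ∀ a ∈ acc, a < t :=
          fun a ha => lt_of_le_of_lt (pv_le_getLast acc hacc a ha x hx) hxt
        have hacc' : (acc ++ [t]).Pairwise (· < ·) := by
          rw [List.pairwise_append]
          refine ⟨hacc, List.pairwise_singleton _ _, ?_⟩
          intro a ha b hb; rw [List.mem_singleton] at hb; subst hb; exact hlt a ha
        obtain ⟨h1, h2⟩ := ih hs' (acc ++ [t]) hacc'
          (by intro a ha b hb
              rcases List.mem_append.mp ha with h | h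
              · exact hcross a h b (List.mem_cons_of_mem _ hb)
              · rw [List.mem_singleton] at h; subst h; exact hts' b hb)
        refine ⟨h1, fun y => ?_⟩
        rw [h2 y]
        simp only [List.mem_append, List.mem_cons]
        tauto

-- the same sort with the LinearOrder-derived instances (propositionally equal Decidable)
lemma pv_sorted_inst (l : List (List Int)) (rev : Bool) :
    @PySem.List.sorted (List Int) (List Int) List.instLT (fun a b => a.decidableLT b) l (fun x => x) rev
    = @PySem.List.sorted (List Int) (List Int) List.instLinearOrder.toLT LinearOrder.toDecidableLT l (fun x => x) rev := by
  congr 1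

-- sort-then-scan equals sorted(set(...))
lemma pv_dedup_eq_sorted_ofList (l : List (List Int)) :
    (List.foldl
      (fun (unique : List (List Int)) t =>
        if unique = [] then unique ++ [t]
        else if PySem.List.pyGet? unique (-1) = some t then unique
        else unique ++ [t]) [] (PySem.List.sorted l (fun x => x) false))
    = PySem.List.sorted (PySem.Set.ofList l) (fun x => x) false := by
  rw [pv_sorted_inst l false, pv_sorted_inst (PySem.Set.ofList l) false]
  have hpw : (@PySem.List.sorted (List Int) (List Int) List.instLinearOrder.toLT
      LinearOrder.toDecidableLT l (fun x => x) false).Pairwise (· ≤ ·) := by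
    simpa using PySem.List.sorted_pairwise l (fun x => x)
  obtain ⟨h1, h2⟩ := pv_foldl_dedup _ hpw [] List.Pairwise.nil (by simp)
  have hnd : (List.foldl
      (fun (unique : List (List Int)) t =>
        if unique = [] then unique ++ [t]
        else if PySem.List.pyGet? unique (-1) = some t then unique
        else unique ++ [t]) []
      (@PySem.List.sorted (List Int) (List Int) List.instLinearOrder.toLT
        LinearOrder.toDecidableLT l (fun x => x) false)).Nodup :=
    h1.imp (fun h => ne_of_lt h)
  have hperm : (List.foldl
      (fun (unique : List (List Int)) t =>
        if unique = [] then unique ++ [t]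
        else if PySem.List.pyGet? unique (-1) = some t then unique
        else unique ++ [t]) []
      (@PySem.List.sorted (List Int) (List Int) List.instLinearOrder.toLT
        LinearOrder.toDecidableLT l (fun x => x) false)).Perm
      (PySem.Set.ofList l) := by
    rw [List.perm_ext_iff_of_nodup hnd (PySem.Set.nodup_ofList l)]
    intro a
    rw [h2 a]
    simp [PySem.Set.mem_ofList, PySem.List.mem_sorted]
  exact (PySem.List.sorted_eq_of_perm_of_pairwise_lt _ _ _ hperm h1).symm

-- ===== VERDICT (by name: the statement is the Claim_ definition above) =====
theorem prepare_unique_pk_tuples_py_spec : Claim_equal_prepare_unique_pk_tuples_py := by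
  intro pk_cols rows _ hpre
  unfold Spec_prepare_unique_pk_tuples_py
  unfold prepare_unique_pk_tuples_py prepare_unique_pk_tuples_py_alt
  by_cases hnil : rows = []
  · simp [hnil]
  · have h : ∀ row ∈ rows, ∀ col ∈ pk_cols, ((PySem.Dict.mk row).get? col).isSome :=
      fun row hr col hc => pv_get?_isSome_of_mem_fst row col (hpre row hr col hc)
    simp only [hnil]
    rw [pv_outerFold pk_cols rows h 0 ([], []), pv_flatMapNil pk_cols rows h 0]
    simp only [ne_eq, not_true_eq_false, not_false_eq_true, if_neg, ite_not]
    simp [pv_dedup_eq_sorted_ofList]
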